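-- pv_equiv track=rewrite | github.com/eunnuricho/Algorithm | 22/Python/1027/pglv2_기능개발.py | solution
-- ===== SOURCE A (Python) =====
-- from collections import deque
--
-- def solution(progresses, speeds):
--     answer = []
--
--     q1 = deque(progresses)
--     q2 = deque(speeds)
--     days = 0
--     arr = []
--
--     for i in range(len(progresses)):
--         target = q1.popleft()
--         s = q2.popleft()
--         target += (s * days)
--         while target < 100:
--             target += s
--             days += 1
--         arr.append(days)
--
--     tmp = set()
--     for a in arr:
--         if a not in tmp:
--             answer.append(arr.count(a))
--         tmp.add(a)
--
--     return answer
-- ===== SOURCE B (Python) =====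
-- def solution(progresses, speeds):
--     answer = []
--     cur = None
--     cnt = 0
--     days = 0
--     for p, s in zip(progresses, speeds):
--         need = -((p - 100) // s)
--         if need < 0:
--             need = 0
--         if need > days:
--             days = need
--         if days == cur:
--             cnt += 1
--         else:
--             if cnt:
--                 answer.append(cnt)
--             cur = days
--             cnt = 1
--     if cnt:
--         answer.append(cnt)
--     return answer
-- ===== Notes on version B (the rewrite author's own statement) =====
-- stated objective: faster
-- what changed: Replaces the per-unit while-loop day simulation and the quadratic arr.count grouping pass with a single O(n) pass that computes each feature's needed days by ceiling division, keeps a running maximum, and counts contiguous equal groups on the fly; intended as asymptotically faster (a timing run saw A time out at n=16 where B returned, so no ratio could be measured).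
-- outside the precondition, e.g. on solution([100], [0]): A returns [1], B raises ZeroDivisionError
import Mathlib
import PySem

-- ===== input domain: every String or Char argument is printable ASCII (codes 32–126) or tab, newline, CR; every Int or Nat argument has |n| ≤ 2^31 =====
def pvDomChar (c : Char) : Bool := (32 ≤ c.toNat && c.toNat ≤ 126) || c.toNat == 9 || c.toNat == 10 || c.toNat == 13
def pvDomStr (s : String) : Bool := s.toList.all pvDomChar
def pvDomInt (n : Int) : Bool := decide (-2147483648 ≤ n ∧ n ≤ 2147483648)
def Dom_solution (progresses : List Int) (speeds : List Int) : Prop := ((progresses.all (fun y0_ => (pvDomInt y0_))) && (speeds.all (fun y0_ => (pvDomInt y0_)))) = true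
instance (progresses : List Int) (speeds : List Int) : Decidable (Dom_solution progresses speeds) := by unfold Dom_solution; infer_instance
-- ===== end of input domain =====

-- B replaces A's per-unit-of-progress while-loop simulation and quadratic arr.count grouping
-- with a single pass: ceiling division + running maximum + on-the-fly contiguous-group counts.


-- ===== PORT A =====

-- 'while target < 100: target += s; days += 1'; the fuel (100 - target).toNat only makes the
-- loop total in Lean — under Pre_ (speed ≥ 1) it never runs out before target ≥ 100.

def pvWhile : Nat → Int → Int → Int → Int × Int
  | 0, target, _, days => (target, days)
  | fuel + 1, target, s, days =>
      if target < 100 then pvWhile fuel (target + s) s (days + 1) else (target, days)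

-- first for-loop: pop from both deques, advance target, record days

def pvPhase1 : List Int → List Int → Int → List Int → List Int
  | [], _, _, arr => arr
  | _ :: _, [], _, arr => arr      -- Python raises IndexError (q2 empty) here; excluded by Pre_
  | p :: ps, s :: ss, days, arr =>
      let target := p + s * days
      let r := pvWhile (100 - target).toNat target s days
      pvPhase1 ps ss r.2 (arr ++ [r.2])

-- second for-loop: 'if a not in tmp: answer.append(arr.count(a)); tmp.add(a)'

def pvPhase2 (arr : List Int) : List Int → List Int → PySem.Set Int → List Int
  | [], answer, _ => answer
  | a :: rest, answer, tmp =>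
      if PySem.Set.contains tmp a then pvPhase2 arr rest answer (PySem.Set.add tmp a)
      else pvPhase2 arr rest (answer ++ [(PySem.List.count arr a : Int)]) (PySem.Set.add tmp a)

def solution (progresses : List Int) (speeds : List Int) : List Int :=
  let arr := pvPhase1 progresses speeds 0 []
  pvPhase2 arr arr [] PySem.Set.empty


-- ===== PORT B =====

def pvAltLoop : List (Int × Int) → List Int → Option Int → Int → Int → List Int × Option Int × Int
  | [], answer, cur, cnt, _ => (answer, cur, cnt)
  | (p, s) :: rest, answer, cur, cnt, days =>
      let need := -(PySem.Int.floordiv (p - 100) s)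
      let need := if need < 0 then 0 else need
      let days := if need > days then need else days
      if some days == cur then pvAltLoop rest answer cur (cnt + 1) days
      else pvAltLoop rest (if cnt ≠ 0 then answer ++ [cnt] else answer) (some days) 1 days

def solution_alt (progresses : List Int) (speeds : List Int) : List Int :=
  let r := pvAltLoop (progresses.zip speeds) [] none 0 0
  if r.2.2 ≠ 0 then r.1 ++ [r.2.2] else r.1


-- ===== PRECONDITION & SPEC =====

-- Pre_ excludes (a) inputs with fewer speeds than progresses, on which A raises IndexError, and
-- (b) inputs whose used speeds are not all ≥ 1, on which A loops forever whenever some target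
-- stays below 100 and otherwise returns while B's ceiling division raises ZeroDivisionError
-- (speed 0) or both return (negative speed with progress already ≥ 100).

def Pre_solution (progresses : List Int) (speeds : List Int) : Prop :=
  progresses.length ≤ speeds.length ∧ ∀ s ∈ speeds.take progresses.length, 1 ≤ s

instance (progresses : List Int) (speeds : List Int) : Decidable (Pre_solution progresses speeds) := by
  unfold Pre_solution; infer_instance

def pvWitness_solution : List Int × List Int := ([93, 30, 55], [1, 30, 5])

def Spec_solution (progresses : List Int) (speeds : List Int) (out : List Int) : Prop := out = solution_alt progresses speeds
instance (progresses : List Int) (speeds : List Int) (out : List Int) : Decidable (Spec_solution progresses speeds out) := by unfold Spec_solution; infer_instance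

-- ===== CLAIM (what is proved, stated in full; the proofs are below) =====
def Claim_equal_solution : Prop := ∀ (progresses : List Int) (speeds : List Int), Dom_solution progresses speeds → Pre_solution progresses speeds → Spec_solution progresses speeds (solution progresses speeds)

-- ===== LEMMAS AND PROOFS =====

-- days each feature needs, clamped at 0 (B's 'need')

def pvNeed (p s : Int) : Int := max 0 (-(PySem.Int.floordiv (p - 100) s))

-- the running-maximum days list both programs produce feature by feature

def pvArr : List (Int × Int) → Int → List Int
  | [], _ => []
  | (p, s) :: rest, d => (max d (pvNeed p s)) :: pvArr rest (max d (pvNeed p s))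

-- run-length encoding: lengths of maximal blocks of equal adjacent values

def pvGroups : List Int → List Int
  | [] => []
  | a :: t =>
      (((t.takeWhile (· == a)).length : Int) + 1) :: pvGroups (t.dropWhile (· == a))
  termination_by l => l.length
  decreasing_by simpa using Nat.lt_succ_of_le (List.length_dropWhile_le _ _)

-- folding a run of already-seen equal values changes nothing

-- B's grouping loop, after the days bookkeeping has been factored out

def pvFoldB : List Int → List Int → Option Int → Int → List Int × Option Int × Int
  | [], ans, cur, cnt => (ans, cur, cnt)
  | a :: rest, ans, cur, cnt =>
      if some a == cur then pvFoldB rest ans cur (cnt + 1)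
      else pvFoldB rest (if cnt ≠ 0 then ans ++ [cnt] else ans) (some a) 1

-- A's while loop adds exactly the missing ceiling number of days

lemma pvWhile_days (s : Int) (hs : 1 ≤ s) :
    ∀ (fuel : Nat) (t d : Int), (100 - t).toNat ≤ fuel →
      (pvWhile fuel t s d).2 = d + max 0 (-(PySem.Int.floordiv (t - 100) s)) := by
  intro fuel
  induction fuel with
  | zero =>
    intro t d h
    have ht : (100 : Int) ≤ t := by omega
    have h0 : 0 ≤ (t - 100) / s := Int.ediv_nonneg (by omega) (by omega)
    rw [PySem.Int.floordiv_eq_ediv_of_pos (by omega)]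
    simp [pvWhile]
    omega
  | succ fuel ih =>
    intro t d h
    by_cases hlt : t < 100
    · have hf : (100 - (t + s)).toNat ≤ fuel := by omega
      have := ih (t + s) (d + 1) hf
      rw [pvWhile, if_pos hlt, this]
      rw [PySem.Int.floordiv_eq_ediv_of_pos (by omega), PySem.Int.floordiv_eq_ediv_of_pos (by omega)]
      have hshift : (t + s - 100) / s = (t - 100) / s + 1 := by
        rw [show t + s - 100 = t - 100 + 1 * s by ring]
        simpa using Int.add_mul_ediv_right (t - 100) 1 (c := s) (by omega)
      have hneg : (t - 100) / s < 0 := Int.ediv_neg_of_neg_of_pos (by omega) (by omega)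
      rw [hshift]; omega
    · have h0 : 0 ≤ (t - 100) / s := Int.ediv_nonneg (by omega) (by omega)
      rw [PySem.Int.floordiv_eq_ediv_of_pos (by omega)]
      rw [pvWhile, if_neg hlt]
      simp; omega

-- phase 1 produces the running-max array

lemma pvPhase1_eq : ∀ (ps ss : List Int) (d : Int) (arr : List Int), 0 ≤ d →
    ps.length ≤ ss.length → (∀ s ∈ ss.take ps.length, 1 ≤ s) →
    pvPhase1 ps ss d arr = arr ++ pvArr (ps.zip ss) d := by
  intro ps
  induction ps with
  | nil => intro ss d arr _ _ _; simp [pvPhase1, pvArr]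
  | cons p ps ih =>
    intro ss d arr hd hlen hsp
    match ss with
    | [] => simp at hlen
    | s :: ss =>
      have hs : 1 ≤ s := hsp s (by simp)
      have hdays : (pvWhile (100 - (p + s * d)).toNat (p + s * d) s d).2 = max d (pvNeed p s) := by
        rw [pvWhile_days s hs _ _ _ (le_refl _)]
        rw [pvNeed, PySem.Int.floordiv_eq_ediv_of_pos (by omega),
            PySem.Int.floordiv_eq_ediv_of_pos (by omega)]
        have hshift : (p + s * d - 100) / s = (p - 100) / s + d := by
          rw [show p + s * d - 100 = p - 100 + d * s by ring]
          exact Int.add_mul_ediv_right _ _ (by omega)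
        rw [hshift]; omega
      rw [pvPhase1]
      simp only [hdays]
      rw [ih ss (max d (pvNeed p s)) _ (by omega) (by simpa using hlen)
            (fun x hx => hsp x (by simp at hx ⊢; right; exact hx))]
      simp [pvArr]

lemma pvArr_le : ∀ (l : List (Int × Int)) (d : Int), ∀ y ∈ pvArr l d, d ≤ y := by
  intro l
  induction l with
  | nil => simp [pvArr]
  | cons ps rest ih =>
    obtain ⟨p, s⟩ := ps
    intro d y hy
    simp [pvArr] at hy
    rcases hy with h | h
    · omega
    · have := ih (max d (pvNeed p s)) y h
      omega

lemma pvArr_pairwise : ∀ (l : List (Int × Int)) (d : Int), (pvArr l d).Pairwise (· ≤ ·) := by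
  intro l
  induction l with
  | nil => simp [pvArr]
  | cons ps rest ih =>
    obtain ⟨p, s⟩ := ps
    intro d
    rw [pvArr, List.pairwise_cons]
    exact ⟨fun y hy => pvArr_le rest _ y hy, ih _⟩

lemma pv_dropWhile_gt (a : Int) : ∀ (t : List Int), t.Pairwise (· ≤ ·) → (∀ y ∈ t, a ≤ y) →
    ∀ y ∈ t.dropWhile (· == a), a < y := by
  intro t
  induction t with
  | nil => simp
  | cons b t ih =>
    intro hp hle y hy
    by_cases hb : b = a
    · subst hb
      rw [List.dropWhile_cons_of_pos (by simp)] at hy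
      exact ih hp.of_cons (fun z hz => hle z (by simp [hz])) y hy
    · rw [List.dropWhile_cons_of_neg (by simpa using hb)] at hy
      have hab : a < b := lt_of_le_of_ne (hle b (by simp)) (Ne.symm hb)
      rcases List.mem_cons.mp hy with rfl | hyt
      · exact hab
      · exact lt_of_lt_of_le hab (List.rel_of_pairwise_cons hp hyt)

-- folding a run of already-seen equal values changes nothing

lemma pvPhase2_run (arr : List Int) (a : Int) :
    ∀ (r l2 ans : List Int) (tmp : PySem.Set Int), (∀ x ∈ r, x = a) →
    PySem.Set.contains tmp a = true →
    pvPhase2 arr (r ++ l2) ans tmp = pvPhase2 arr l2 ans tmp := by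
  intro r
  induction r with
  | nil => simp
  | cons x r ih =>
    intro l2 ans tmp hall hc
    have hx : x = a := hall x (by simp)
    subst hx
    rw [List.cons_append, pvPhase2, if_pos hc]
    rw [show PySem.Set.add tmp x = tmp by unfold PySem.Set.add; rw [if_pos hc]]
    exact ih l2 ans tmp (fun z hz => hall z (by simp [hz])) hc

-- A's grouping pass equals run-length encoding on a non-decreasing list

lemma pvPhase2_eq (arr : List Int) : ∀ (n : Nat) (rem : List Int), rem.length ≤ n →
    ∀ (ans : List Int) (tmp : PySem.Set Int), rem.Pairwise (· ≤ ·) →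
    (∀ y ∈ rem, List.count y arr = List.count y rem) →
    (∀ y ∈ rem, PySem.Set.contains tmp y = false) →
    pvPhase2 arr rem ans tmp = ans ++ pvGroups rem := by
  intro n
  induction n with
  | zero =>
    intro rem h ans tmp _ _ _
    have : rem = [] := List.eq_nil_of_length_eq_zero (by omega)
    subst this; simp [pvPhase2, pvGroups]
  | succ n ih =>
    intro rem hlen ans tmp hpw hcount htmp
    match rem with
    | [] => simp [pvPhase2, pvGroups]
    | a :: t =>
      have hta : ∀ y ∈ t, a ≤ y := fun y hy => List.rel_of_pairwise_cons hpw hy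
      have hgt : ∀ y ∈ t.dropWhile (· == a), a < y :=
        pv_dropWhile_gt a t hpw.of_cons hta
      have h1 : List.count a (t.takeWhile (· == a)) = (t.takeWhile (· == a)).length :=
        List.count_eq_length.mpr (fun b hb => by
          have := List.mem_takeWhile_imp hb; simp at this; omega)
      have h2 : List.count a (t.dropWhile (· == a)) = 0 :=
        List.count_eq_zero.mpr (fun hmem => by have := hgt a hmem; omega)
      have ht' : List.count a t = (t.takeWhile (· == a)).length := by
        conv_lhs => rw [← List.takeWhile_append_dropWhile (p := (· == a)) (l := t)]
        rw [List.count_append, h1, h2]; omega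
      have hcnt : (PySem.List.count arr a : Int) = ((t.takeWhile (· == a)).length : Int) + 1 := by
        rw [PySem.List.count_eq, hcount a (by simp), List.count_cons_self, ht']
        push_cast; ring
      have hne : ¬ (PySem.Set.contains tmp a = true) := by
        rw [htmp a (by simp)]; simp
      have hadd : PySem.Set.add tmp a = tmp ++ [a] := by
        unfold PySem.Set.add; rw [if_neg hne]
      have hcontains_a : PySem.Set.contains (PySem.Set.add tmp a) a = true := by
        rw [hadd]; simp [PySem.Set.contains]
      have hsplit : pvPhase2 arr (a :: t) ans tmp
          = pvPhase2 arr (t.dropWhile (· == a))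
              (ans ++ [(PySem.List.count arr a : Int)]) (PySem.Set.add tmp a) := by
        rw [pvPhase2, if_neg hne]
        conv_lhs => rw [← List.takeWhile_append_dropWhile (p := (· == a)) (l := t)]
        exact pvPhase2_run arr a _ _ _ _
          (fun x hx => by have := List.mem_takeWhile_imp hx; simpa using this)
          hcontains_a
      rw [hsplit, ih (t.dropWhile (· == a))
            (by have := List.length_dropWhile_le (· == a) t; simp at hlen; omega)
            _ _
            (hpw.of_cons.sublist (List.dropWhile_sublist _))
            ?_ ?_]
      · rw [pvGroups, hcnt]
        simp
      · intro y hy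
        have hya : a < y := hgt y hy
        have hmem : y ∈ t := (List.dropWhile_sublist _).mem hy
        have h2' : List.count y (t.takeWhile (· == a)) = 0 :=
          List.count_eq_zero.mpr (fun hmem2 => by
            have := List.mem_takeWhile_imp hmem2; simp at this; omega)
        rw [hcount y (by simp [hmem]), List.count_cons_of_ne (by omega)]
        conv_lhs => rw [← List.takeWhile_append_dropWhile (p := (· == a)) (l := t)]
        rw [List.count_append, h2', Nat.zero_add]
      · intro y hy
        have hya : a < y := hgt y hy
        have hmem : y ∈ t := (List.dropWhile_sublist _).mem hy
        have hy' : PySem.Set.contains tmp y = false := htmp y (by simp [hmem])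
        rw [hadd]
        simp only [PySem.Set.contains] at hy' ⊢
        simp only [List.contains_append, hy', Bool.false_or]
        simp
        omega

-- B's loop = pvFoldB over the running-max array

lemma pvAltLoop_eq : ∀ (l : List (Int × Int)) (ans : List Int) (cur : Option Int) (cnt d : Int),
    pvAltLoop l ans cur cnt d = pvFoldB (pvArr l d) ans cur cnt := by
  intro l
  induction l with
  | nil => intro ans cur cnt d; rfl
  | cons ps rest ih =>
    obtain ⟨p, s⟩ := ps
    intro ans cur cnt d
    have hd : (if (if -(PySem.Int.floordiv (p - 100) s) < 0 then 0
                   else -(PySem.Int.floordiv (p - 100) s)) > d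
               then (if -(PySem.Int.floordiv (p - 100) s) < 0 then 0
                     else -(PySem.Int.floordiv (p - 100) s)) else d)
             = max d (pvNeed p s) := by
      rw [pvNeed]; split_ifs <;> omega
    rw [pvAltLoop, pvArr]
    simp only [hd, pvFoldB]
    split_ifs <;> rw [ih]

-- pvFoldB computes run-length encoding

lemma pvFoldB_eq : ∀ (rem ans : List Int) (c cnt : Int), 1 ≤ cnt →
    (if (pvFoldB rem ans (some c) cnt).2.2 ≠ 0 then
      (pvFoldB rem ans (some c) cnt).1 ++ [(pvFoldB rem ans (some c) cnt).2.2]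
     else (pvFoldB rem ans (some c) cnt).1)
    = ans ++ ((cnt + ((rem.takeWhile (· == c)).length : Int)) :: pvGroups (rem.dropWhile (· == c))) := by
  intro rem
  induction rem with
  | nil =>
    intro ans c cnt hcnt
    rw [pvFoldB]
    simp [pvGroups]
    omega
  | cons a t ih =>
    intro ans c cnt hcnt
    by_cases hac : a = c
    · subst hac
      have hstep : pvFoldB (a :: t) ans (some a) cnt = pvFoldB t ans (some a) (cnt + 1) := by
        rw [pvFoldB, if_pos (by simp)]
      rw [hstep, ih ans a (cnt + 1) (by omega)]
      rw [List.takeWhile_cons_of_pos (by simp), List.dropWhile_cons_of_pos (by simp)]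
      simp; ring_nf
    · have hstep : pvFoldB (a :: t) ans (some c) cnt = pvFoldB t (ans ++ [cnt]) (some a) 1 := by
        rw [pvFoldB, if_neg (by simp [hac]), if_pos (by omega)]
      rw [hstep, ih (ans ++ [cnt]) a 1 (by omega)]
      rw [List.takeWhile_cons_of_neg (by simp [hac]), List.dropWhile_cons_of_neg (by simp [hac])]
      rw [pvGroups]
      simp; ring_nf


-- ===== VERDICT (by name: the statement is the Claim_ definition above) =====

theorem solution_spec : Claim_equal_solution := by
  intro ps ss _ hpre
  unfold Spec_solution
  have hL : solution ps ss
      = pvPhase2 (pvPhase1 ps ss 0 []) (pvPhase1 ps ss 0 []) [] PySem.Set.empty := rfl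
  have hR : solution_alt ps ss
      = (if (pvAltLoop (ps.zip ss) [] none 0 0).2.2 ≠ 0 then
          (pvAltLoop (ps.zip ss) [] none 0 0).1 ++ [(pvAltLoop (ps.zip ss) [] none 0 0).2.2]
         else (pvAltLoop (ps.zip ss) [] none 0 0).1) := rfl
  rw [hL, hR]
  have harr : pvPhase1 ps ss 0 [] = pvArr (ps.zip ss) 0 := by
    rw [pvPhase1_eq ps ss 0 [] (le_refl 0) hpre.1 hpre.2]; simp
  rw [harr, pvAltLoop_eq]
  have hA : pvPhase2 (pvArr (ps.zip ss) 0) (pvArr (ps.zip ss) 0) [] PySem.Set.empty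
      = pvGroups (pvArr (ps.zip ss) 0) := by
    rw [pvPhase2_eq (pvArr (ps.zip ss) 0) (pvArr (ps.zip ss) 0).length _ (le_refl _) [] _
          (pvArr_pairwise _ _) (fun y _ => rfl) (fun y _ => rfl)]
    simp
  rw [hA]
  match harr2 : pvArr (ps.zip ss) 0 with
  | [] => simp [pvGroups, pvFoldB]
  | a :: t =>
    have hstep : pvFoldB (a :: t) [] none 0 = pvFoldB t [] (some a) 1 := by
      rw [pvFoldB]; simp
    rw [hstep]
    rw [pvFoldB_eq t [] a 1 (by omega)]
    rw [pvGroups]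
    simp; ring_nf
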